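-- pv_equiv track=rewrite | github.com/DigitalPhonetics/IMS-Toucan | Architectures/Aligner/CodecAlignerDataset.py | invert_segments
-- ===== SOURCE A (Python) =====
-- def invert_segments(segments, total_duration):
--     if not segments:
--         return [{'start': 0, 'end': total_duration}]
--
--     inverted_segments = []
--     previous_end = 0
--
--     for segment in segments:
--         start = segment['start']
--         if previous_end < start:
--             inverted_segments.append({'start': previous_end, 'end': start})
--         previous_end = segment['end']
--
--     if previous_end < total_duration:
--         inverted_segments.append({'start': previous_end, 'end': total_duration})
--
--     return inverted_segments
-- ===== SOURCE B (Python) =====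
-- def invert_segments(segments, total_duration):
--     if not segments:
--         return [{'start': 0, 'end': total_duration}]
--
--     def gaps(prev_end, segs):
--         # recursion on the segment list, building the result back-to-front by prepending
--         if not segs:
--             return [{'start': prev_end, 'end': total_duration}] if prev_end < total_duration else []
--         head = segs[0]
--         tail = gaps(head['end'], segs[1:])
--         if prev_end < head['start']:
--             return [{'start': prev_end, 'end': head['start']}] + tail
--         return tail
--
--     return gaps(0, segments)
-- ===== Notes on version B (the rewrite author's own statement) =====
-- stated objective: alternative
-- what changed: Replaces A's iterative loop with a mutable accumulator list and trailing-gap postlude by a structural recursion on the segment list that builds the gap list back-to-front by prepending, with the final gap produced in the base case.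
import Mathlib
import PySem

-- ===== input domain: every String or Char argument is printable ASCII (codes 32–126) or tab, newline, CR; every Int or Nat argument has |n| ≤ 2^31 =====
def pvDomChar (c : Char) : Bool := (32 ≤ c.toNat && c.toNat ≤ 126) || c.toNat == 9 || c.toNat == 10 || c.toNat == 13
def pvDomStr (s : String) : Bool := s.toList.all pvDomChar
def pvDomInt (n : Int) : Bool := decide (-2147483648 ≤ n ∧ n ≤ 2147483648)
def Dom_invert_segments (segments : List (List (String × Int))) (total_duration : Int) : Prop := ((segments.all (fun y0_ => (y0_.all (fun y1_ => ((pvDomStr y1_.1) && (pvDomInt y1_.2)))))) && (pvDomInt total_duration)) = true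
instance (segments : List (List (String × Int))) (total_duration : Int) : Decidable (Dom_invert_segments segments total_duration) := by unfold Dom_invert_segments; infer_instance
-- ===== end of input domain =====

-- B replaces A's accumulator loop + trailing-gap postlude by a structural recursion that
-- builds the gap list back-to-front by prepending; alternative decomposition, same cost.

-- seg[k] for an association-list dict: first matching key; default only takes effect
-- outside Pre_ (Python raises KeyError there).
def pvGetKey (seg : List (String × Int)) (k : String) : Int :=
  ((seg.find? (fun p => p.1 == k)).map (·.2)).getD 0

-- ===== PORT A =====
def invert_segments (segments : List (List (String × Int))) (total_duration : Int) : List (List (String × Int)) :=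
  if segments.isEmpty then
    [[("start", (0 : Int)), ("end", total_duration)]]
  else
    let r := segments.foldl
      (fun (st : List (List (String × Int)) × Int) seg =>
        let start := pvGetKey seg "start"
        let acc := if st.2 < start then st.1 ++ [[("start", st.2), ("end", start)]] else st.1
        (acc, pvGetKey seg "end"))
      ([], 0)
    if r.2 < total_duration then r.1 ++ [[("start", r.2), ("end", total_duration)]] else r.1

-- ===== PORT B =====
-- inner recursive helper 'gaps' of Source B
def pvGaps (total_duration : Int) (prev_end : Int) : List (List (String × Int)) → List (List (String × Int))
  | [] => if prev_end < total_duration then [[("start", prev_end), ("end", total_duration)]] else []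
  | head :: rest =>
      let tail := pvGaps total_duration (pvGetKey head "end") rest
      if prev_end < pvGetKey head "start" then
        [("start", prev_end), ("end", pvGetKey head "start")] :: tail
      else tail

def invert_segments_alt (segments : List (List (String × Int))) (total_duration : Int) : List (List (String × Int)) :=
  if segments.isEmpty then
    [[("start", (0 : Int)), ("end", total_duration)]]
  else
    pvGaps total_duration 0 segments

-- ===== PRECONDITION & SPEC =====
-- Pre_ excludes only segments missing a 'start' or 'end' key, on which Python A raises KeyError.
def Pre_invert_segments (segments : List (List (String × Int))) (total_duration : Int) : Prop :=
  ∀ seg ∈ segments, (seg.find? (fun p => p.1 == "start")).isSome ∧ (seg.find? (fun p => p.1 == "end")).isSome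
instance (segments : List (List (String × Int))) (total_duration : Int) : Decidable (Pre_invert_segments segments total_duration) := by unfold Pre_invert_segments; infer_instance

def pvWitness_invert_segments : (List (List (String × Int))) × Int :=
  ([[("start", 2), ("end", 4)], [("start", 6), ("end", 7)]], 10)

def Spec_invert_segments (segments : List (List (String × Int))) (total_duration : Int) (out : List (List (String × Int))) : Prop := out = invert_segments_alt segments total_duration
instance (segments : List (List (String × Int))) (total_duration : Int) (out : List (List (String × Int))) : Decidable (Spec_invert_segments segments total_duration out) := by unfold Spec_invert_segments; infer_instance

-- ===== CLAIM (what is proved, stated in full; the proofs are below) =====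
def Claim_equal_invert_segments : Prop := ∀ (segments : List (List (String × Int))) (total_duration : Int), Dom_invert_segments segments total_duration → Pre_invert_segments segments total_duration → Spec_invert_segments segments total_duration (invert_segments segments total_duration)

-- ===== LEMMAS AND PROOFS =====

-- Loop invariant: A's fold from state (acc, prev), with the final tail append, equals
-- acc followed by B's back-to-front recursion started at prev.
theorem invert_loop_eq (segs : List (List (String × Int))) (td : Int) :
    ∀ (acc : List (List (String × Int))) (prev : Int),
      (let r := segs.foldl
        (fun (st : List (List (String × Int)) × Int) seg =>
          let start := pvGetKey seg "start"
          let acc := if st.2 < start then st.1 ++ [[("start", st.2), ("end", start)]] else st.1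
          (acc, pvGetKey seg "end"))
        (acc, prev)
       if r.2 < td then r.1 ++ [[("start", r.2), ("end", td)]] else r.1)
      = acc ++ pvGaps td prev segs := by
  induction segs with
  | nil =>
      intro acc prev
      simp only [List.foldl_nil, pvGaps]
      split_ifs with h <;> simp
  | cons s ss ih =>
      intro acc prev
      simp only [List.foldl_cons, pvGaps]
      rw [ih]
      by_cases h : prev < pvGetKey s "start" <;> simp [h]

theorem invert_segments_spec_aux (segments : List (List (String × Int))) (total_duration : Int) :
    invert_segments segments total_duration = invert_segments_alt segments total_duration := by
  unfold invert_segments invert_segments_alt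
  split_ifs with h
  · rfl
  · exact invert_loop_eq segments total_duration [] 0

-- ===== VERDICT (by name: the statement is the Claim_ definition above) =====
theorem invert_segments_spec : Claim_equal_invert_segments := by
  intro segments total_duration _ _
  exact invert_segments_spec_aux segments total_duration
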